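-- pv_equiv track=rewrite | github.com/hyeongjin-kim/co_te | dice.py | solution
-- ===== SOURCE A (Python) =====
-- from itertools import combinations
-- from collections import defaultdict
--
-- def solution(dice):
--     answer = []
--     max_win = 0
--     com = list(combinations([i for i in range(len(dice))], len(dice)//2)) #주사위를 가잘 수 있는 모든 경우의 수 생성
--     case = [[com[i], com[-1-i]] for i in range(len(com)//2)] #주사위를 뽑았을 때 나와 상대가 보유한 주사위끼리 묶어 매치의 경우의 수 생성
--
--     for a, b in case:
--         case_a = defaultdict(int) #내가 낼 수 있는 경우의 수
--         case_b = defaultdict(int) #상대가 낼 수 있는 경우의 수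
--
--         for dice_num in a:
--             c_a = defaultdict(int) #임시 경우의 수 딕셔너리
--             if(not case_a): #맨 처음 주사위를 던질 때
--                 for num in dice[dice_num]:
--                     case_a[num] += 1 #던진 주사위 눈금을 낼 수 있는 경우의 수가 1 증가
--             else:
--                 for before_case in case_a.keys(): #두번째부터
--                     for num in dice[dice_num]:
--                         c_a[before_case + num] += case_a[before_case] #임시 경우의 수 딕셔너리에 지금까지 주사위를 던져 나온 경우의 수에 지금 던진 주사위를 더해 이 숫자를 만들 수 있는 경우의 수가 1 증가
--                 case_a = c_a #경우의 수 딕셔너리 업데이드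
--         for dice_num in b:
--             c_b = defaultdict(int) #임시 경우의 수 딕셔너리
--             if(not case_b): #맨 처음 주사위를 던질 때
--                 for num in dice[dice_num]:
--                     case_b[num] += 1 #던진 주사위 눈금을 낼 수 있는 경우의 수가 1 증가
--             else:
--                 for before_case in case_b.keys():
--                     for num in dice[dice_num]:
--                         c_b[before_case + num] += case_b[before_case] #임시 경우의 수 딕셔너리에 지금까지 주사위를 던져 나온 경우의 수에 지금 던진 주사위를 더해 이 숫자를 만들 수 있는 경우의 수가 1 증가
--                 case_b = c_b #경우의 수 딕셔너리 업데이드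
--
--         win, draw, lose = 0, 0, 0 #승, 무, 패 세기
--         for aa in case_a.keys():
--             for bb in case_b.keys():
--                 #각각의 경우의 수 매치
--                 if(aa > bb):
--                     win += case_a[aa]*case_b[bb] #내가 이기는 경우
--                 elif(aa == bb):
--                     draw += case_a[aa]*case_b[bb] #비기는 경우
--                 else:
--                     lose += case_a[aa]*case_b[bb] #내가 지는 경우
--         if(max_win < win):
--             max_win = win #승이 maxwin보다 많은 경우 최대 승리수 업데이트
--             answer = [i + 1 for i in a] #답을 내 주사위들로 채움
--         if(max_win < lose):
--             max_win = lose #패가 maxwin보다 많은 경우 -> 나와 상대의 주사위가 바뀐다면 내가 이기는경우의 수가 많아짐 -> 최대 승리수 업데이트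
--             answer = [i + 1 for i in b] #답을 상대 주사위들로 채움
--
--     return answer
-- ===== SOURCE B (Python) =====
-- from itertools import combinations
--
-- def _sums(dice, idxs):
--     sums = [0]
--     for i in idxs:
--         sums = [s + f for s in sums for f in dice[i]]
--     return sums
--
-- def _count_greater(xs, ys):
--     # xs, ys ascending; number of pairs (x, y) with x in xs, y in ys, x > y
--     j = 0
--     total = 0
--     for x in xs:
--         while j < len(ys) and ys[j] < x:
--             j += 1
--         total += j
--     return total
--
-- def solution(dice):
--     n = len(dice)
--     com = list(combinations(range(n), n // 2))
--     answer, max_win = [], 0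
--     for i in range(len(com) // 2):
--         a, b = com[i], com[-1 - i]
--         sa = sorted(_sums(dice, a))
--         sb = sorted(_sums(dice, b))
--         win = _count_greater(sa, sb)
--         lose = _count_greater(sb, sa)
--         if max_win < win:
--             max_win, answer = win, [j + 1 for j in a]
--         if max_win < lose:
--             max_win, answer = lose, [j + 1 for j in b]
--     return answer
-- ===== Notes on version B (the rewrite author's own statement) =====
-- stated objective: faster
-- what changed: Replaces A's per-matchup count dictionaries and quadratic distinct-sum x distinct-sum comparison loop by explicit sum lists that are sorted once and compared with a linear two-pointer merge.
-- outside the precondition, e.g. on solution([[], [1], [2], [3]]): A returns [3, 4], B returns []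
import Mathlib
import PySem

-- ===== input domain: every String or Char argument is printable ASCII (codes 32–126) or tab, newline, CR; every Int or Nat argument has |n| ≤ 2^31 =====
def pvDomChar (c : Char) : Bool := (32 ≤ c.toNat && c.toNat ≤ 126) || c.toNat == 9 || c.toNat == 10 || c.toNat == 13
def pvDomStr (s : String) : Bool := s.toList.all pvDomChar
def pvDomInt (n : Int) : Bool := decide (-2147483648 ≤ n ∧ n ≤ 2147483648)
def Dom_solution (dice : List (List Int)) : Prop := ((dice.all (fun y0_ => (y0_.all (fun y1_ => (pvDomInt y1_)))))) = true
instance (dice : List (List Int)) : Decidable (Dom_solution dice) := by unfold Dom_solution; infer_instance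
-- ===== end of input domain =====

-- B replaces A's per-matchup count dictionaries and quadratic distinct-sum × distinct-sum
-- comparison loop by explicit sum lists, sorted once and compared with a linear two-pointer
-- merge (objective: faster; measured).

-- ===== PORT A =====
-- A's per-side accumulation loop (the Python body runs this same loop once for `a`, once for `b`).
def buildCase (dice : List (List Int)) (idxs : List Int) : PySem.Dict Int Int :=
  idxs.foldl (fun case_a dice_num =>
    if case_a.items.isEmpty then
      (PySem.List.pyGetD dice dice_num []).foldl
        (fun d num => d.insert num (d.getD num 0 + 1)) case_a
    else
      case_a.keys.foldl (fun c_a before_case =>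
        (PySem.List.pyGetD dice dice_num []).foldl
          (fun c num => c.insert (before_case + num)
            (c.getD (before_case + num) 0 + case_a.getD before_case 0)) c_a)
        PySem.Dict.empty)
    PySem.Dict.empty

-- A's win/draw/lose double loop over the two dicts' keys.
def tripleCount (case_a case_b : PySem.Dict Int Int) : Int × Int × Int :=
  case_a.keys.foldl (fun t aa =>
    case_b.keys.foldl (fun t bb =>
      if aa > bb then (t.1 + case_a.getD aa 0 * case_b.getD bb 0, t.2.1, t.2.2)
      else if aa = bb then (t.1, t.2.1 + case_a.getD aa 0 * case_b.getD bb 0, t.2.2)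
      else (t.1, t.2.1, t.2.2 + case_a.getD aa 0 * case_b.getD bb 0)) t)
    ((0 : Int), (0 : Int), (0 : Int))

def solution (dice : List (List Int)) : List Int :=
  let com := PySem.List.combinations (PySem.List.pyRange 0 (dice.length : Int) 1) (dice.length / 2)
  let case := (List.range (com.length / 2)).map
    (fun i => (com.getD i [], com.getD (com.length - 1 - i) []))
  (case.foldl (fun st ab =>
      let case_a := buildCase dice ab.1
      let case_b := buildCase dice ab.2
      let wdl := tripleCount case_a case_b
      let st1 := if st.2 < wdl.1 then (ab.1.map (· + 1), wdl.1) else st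
      if st1.2 < wdl.2.2 then (ab.2.map (· + 1), wdl.2.2) else st1)
    (([] : List Int), (0 : Int))).1

-- ===== PORT B =====
-- B: list of all attainable sums (with multiplicity) of the dice named by idxs.
def sumsB (dice : List (List Int)) (idxs : List Int) : List Int :=
  idxs.foldl (fun sums i => sums.flatMap (fun s => (PySem.List.pyGetD dice i []).map (fun f => s + f)))
    [(0 : Int)]

-- B's inner `while j < len(ys) and ys[j] < x: j += 1`, with the not-yet-passed suffix of ys as state.
def advance (x : Int) : List Int → Int → List Int × Int
  | [], j => ([], j)
  | y :: t, j => if y < x then advance x t (j + 1) else (y :: t, j)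

-- B's `for x in xs: ... total += j` loop.
def cgAux : List Int → List Int → Int → Int → Int
  | [], _, _, total => total
  | x :: xs, ys, j, total =>
    let p := advance x ys j
    cgAux xs p.1 p.2 (total + p.2)

-- number of pairs (x, y) with x in xs, y in ys
def countGreater (xs ys : List Int) : Int := cgAux xs ys 0 0

def solution_alt (dice : List (List Int)) : List Int :=
  let com := PySem.List.combinations (PySem.List.pyRange 0 (dice.length : Int) 1) (dice.length / 2)
  ((List.range (com.length / 2)).foldl (fun st i =>
      let a := com.getD i []
      let b := com.getD (com.length - 1 - i) []
      let sa := PySem.List.sorted (sumsB dice a) (fun x => x) false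
      let sb := PySem.List.sorted (sumsB dice b) (fun x => x) false
      let win := countGreater sa sb
      let lose := countGreater sb sa
      let st1 := if st.2 < win then (a.map (· + 1), win) else st
      if st1.2 < lose then (b.map (· + 1), lose) else st1)
    (([] : List Int), (0 : Int))).1

-- ===== PRECONDITION & SPEC =====
-- Pre_ excludes dice lists in which an empty die (a die with no faces — degenerate input no caller
-- would supply) is followed by a later nonempty die: only there can A's accidental dict-reset, which
-- treats an empty die as absent when it starts a picked half, produce a value differing from B's
-- principled "a half containing a faceless die has zero outcomes"; neither value is specified.
def Pre_solution (dice : List (List Int)) : Prop := ∀ d ∈ dice.dropWhile (fun d => !d.isEmpty), d = []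
instance (dice : List (List Int)) : Decidable (Pre_solution dice) := by unfold Pre_solution; infer_instance

def pvWitness_solution : List (List Int) := [[1, 2], [3], [2, 4], [1]]

def Spec_solution (dice : List (List Int)) (out : List Int) : Prop := out = solution_alt dice
instance (dice : List (List Int)) (out : List Int) : Decidable (Spec_solution dice out) := by unfold Spec_solution; infer_instance

-- ===== CLAIM (what is proved, stated in full; the proofs are below) =====
def Claim_equal_solution : Prop := ∀ (dice : List (List Int)), Dom_solution dice → Pre_solution dice → Spec_solution dice (solution dice)

-- ===== LEMMAS AND PROOFS =====

lemma getD_wfold (ps : List (Int × Int)) (c0 : PySem.Dict Int Int) (s : Int) :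
    (ps.foldl (fun c p => c.insert p.1 (c.getD p.1 0 + p.2)) c0).getD s 0
      = c0.getD s 0 + ((ps.filter (fun p => p.1 == s)).map (·.2)).sum := by
  induction ps generalizing c0 with
  | nil => simp
  | cons p ps ih =>
    simp only [List.foldl_cons, ih, List.filter_cons]
    by_cases h : p.1 = s
    · simp [h, PySem.Dict.getD_insert]; ring
    · simp [h, PySem.Dict.getD_insert, Ne.symm h]

lemma nested_eq_wfold (die : List Int) (w : Int → Int) (ks : List Int) (c0 : PySem.Dict Int Int) :
    ks.foldl (fun c_a k =>
        die.foldl (fun c f => c.insert (k + f) (c.getD (k + f) 0 + w k)) c_a) c0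
      = (ks.flatMap (fun k => die.map (fun f => (k + f, w k)))).foldl
          (fun c p => c.insert p.1 (c.getD p.1 0 + p.2)) c0 := by
  induction ks generalizing c0 with
  | nil => simp
  | cons k ks ih =>
    simp only [List.foldl_cons, List.flatMap_cons, List.foldl_append, ih, List.foldl_map]

lemma count_flatMap (L : List Int) (g : Int → List Int) (s : Int) :
    (((L.flatMap g).count s : Int)) = (L.map (fun x => ((g x).count s : Int))).sum := by
  induction L with
  | nil => simp
  | cons x L ih => simp [List.count_append, ih]

lemma counter_sum (h : Int → Int) :
    ∀ (ks L : List Int), ks.Nodup → (∀ k, k ∈ ks ↔ k ∈ L) →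
    (ks.map (fun k => (L.count k : Int) * h k)).sum = (L.map h).sum := by
  intro ks
  induction ks with
  | nil =>
    intro L _ hcov
    have hL : L = [] := by
      cases L with
      | nil => rfl
      | cons a L => exact absurd ((hcov a).2 List.mem_cons_self) (by simp)
    simp [hL]
  | cons k ks ih =>
    intro L hnd hcov
    obtain ⟨hkn, hnd'⟩ := List.nodup_cons.mp hnd
    have hperm := List.filter_append_perm (fun x => x == k) L
    have hsumL : (L.map h).sum
        = ((L.filter (fun x => x == k)).map h).sum + ((L.filter (fun x => !(x == k))).map h).sum := by
      rw [← List.sum_append, ← List.map_append]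
      exact ((hperm.map h).sum_eq).symm
    have h1 : ((L.filter (fun x => x == k)).map h).sum = (L.count k : Int) * h k := by
      rw [List.filter_beq, List.map_replicate, List.sum_replicate, nsmul_eq_mul]
    have hcov' : ∀ k', k' ∈ ks ↔ k' ∈ L.filter (fun x => !(x == k)) := by
      intro k'
      constructor
      · intro hm
        have hne : k' ≠ k := fun he => hkn (he ▸ hm)
        simp [List.mem_filter, hne, (hcov k').1 (List.mem_cons_of_mem _ hm)]
      · intro hm
        rw [List.mem_filter] at hm
        have hne : k' ≠ k := by simpa using hm.2
        have := (hcov k').2 hm.1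
        rcases List.mem_cons.mp this with he | hm2
        · exact absurd he hne
        · exact hm2
    have hcnt : ks.map (fun k' => (L.count k' : Int) * h k')
        = ks.map (fun k' => ((L.filter (fun x => !(x == k))).count k' : Int) * h k') := by
      apply List.map_congr_left
      intro k' hm
      have hne : k' ≠ k := fun he => hkn (he ▸ hm)
      rw [List.count_filter (by simpa using hne)]
    rw [List.map_cons, List.sum_cons, hcnt, ih _ hnd' hcov', hsumL, h1]

lemma sum_swap (F : Int → Int → Int) (LA LB : List Int) :
    (LA.map (fun x => (LB.map (fun y => F x y)).sum)).sum
      = (LB.map (fun y => (LA.map (fun x => F x y)).sum)).sum := by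
  induction LA with
  | nil => simp
  | cons x LA ih =>
    simp only [List.map_cons, List.sum_cons, ih]
    rw [PySem.List.sum_map_add_int LB (fun y => F x y) (fun y => (LA.map (fun x => F x y)).sum)]

lemma countP_lt_of_sorted (x : Int) (ys : List Int) (hs : ys.Pairwise (· ≤ ·)) :
    ys.countP (fun y => y < x) = (ys.takeWhile (fun y => y < x)).length := by
  induction ys with
  | nil => simp
  | cons y t ih =>
    rw [List.pairwise_cons] at hs
    by_cases h : y < x
    · simp [h, ih hs.2]
    · have ht : t.countP (fun y => y < x) = 0 := by
        apply List.countP_eq_zero.mpr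
        intro z hz
        simp only [decide_eq_true_eq]
        intro hzx
        exact h (lt_of_le_of_lt (hs.1 z hz) hzx)
      simp [h, ht]

lemma advance_spec (x : Int) (ys : List Int) (j : Int) :
    advance x ys j = (ys.dropWhile (fun y => y < x), j + ((ys.takeWhile (fun y => y < x)).length : Int)) := by
  induction ys generalizing j with
  | nil => simp [advance]
  | cons y t ih =>
    by_cases h : y < x
    · simp [advance, h, ih]; ring
    · simp [advance, h]

lemma cgAux_spec (xs : List Int) : ∀ (ys : List Int) (j tot : Int),
    xs.Pairwise (· ≤ ·) → ys.Pairwise (· ≤ ·) →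
    cgAux xs ys j tot = tot + (xs.map (fun x => j + (ys.countP (fun y => y < x) : Int))).sum := by
  induction xs with
  | nil => intro ys j tot _ _; simp [cgAux]
  | cons x xs ih =>
    intro ys j tot hxs hys
    rw [List.pairwise_cons] at hxs
    have hrest : (ys.dropWhile (fun y => y < x)).Pairwise (· ≤ ·) :=
      hys.sublist (List.dropWhile_sublist _)
    have hcnt : ys.countP (fun y => y < x) = (ys.takeWhile (fun y => y < x)).length :=
      countP_lt_of_sorted x ys hys
    have hsplit : ∀ x' ∈ xs, ys.countP (fun y => y < x')
        = (ys.takeWhile (fun y => y < x)).length + (ys.dropWhile (fun y => y < x)).countP (fun y => y < x') := by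
      intro x' hm
      conv_lhs => rw [← List.takeWhile_append_dropWhile (p := fun y => decide (y < x)) (l := ys)]
      rw [List.countP_append]
      congr 1
      apply List.countP_eq_length.mpr
      intro z hz
      have hzx : z < x := by simpa using List.mem_takeWhile_imp hz
      simpa using lt_of_lt_of_le hzx (hxs.1 x' hm)
    rw [cgAux, advance_spec]
    rw [ih _ _ _ hxs.2 hrest]
    simp only [List.map_cons, List.sum_cons, hcnt]
    have : xs.map (fun x' => j + ((ys.takeWhile (fun y => y < x)).length : Int) + ((ys.dropWhile (fun y => y < x)).countP (fun y => y < x') : Int))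
        = xs.map (fun x' => j + (ys.countP (fun y => y < x') : Int)) := by
      apply List.map_congr_left
      intro x' hm
      rw [hsplit x' hm]
      push_cast
      ring
    rw [this]
    ring

lemma countGreater_spec (LA LB : List Int) :
    countGreater (PySem.List.sorted LA (fun x => x) false) (PySem.List.sorted LB (fun x => x) false)
      = (LA.map (fun x => (LB.countP (fun y => y < x) : Int))).sum := by
  have hpa : (PySem.List.sorted LA (fun x => x) false).Pairwise (· ≤ ·) :=
    PySem.List.sorted_pairwise LA (fun x => x)
  have hpb : (PySem.List.sorted LB (fun x => x) false).Pairwise (· ≤ ·) :=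
    PySem.List.sorted_pairwise LB (fun x => x)
  rw [countGreater, cgAux_spec _ _ _ _ hpa hpb, zero_add]
  have h1 : ∀ x : Int, ((PySem.List.sorted LB (fun x => x) false).countP (fun y => y < x) : Int)
      = (LB.countP (fun y => y < x) : Int) := by
    intro x
    rw [(PySem.List.sorted_perm LB (fun x => x) false).countP_eq]
  have h2 : (PySem.List.sorted LA (fun x => x) false).map (fun x => (0:Int) + (LB.countP (fun y => y < x) : Int))
      = (PySem.List.sorted LA (fun x => x) false).map (fun x => (LB.countP (fun y => y < x) : Int)) := by
    simp
  calc ((PySem.List.sorted LA (fun x => x) false).map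
          (fun x => (0:Int) + ((PySem.List.sorted LB (fun x => x) false).countP (fun y => y < x) : Int))).sum
      = ((PySem.List.sorted LA (fun x => x) false).map (fun x => (LB.countP (fun y => y < x) : Int))).sum := by
        rw [show (fun x => (0:Int) + ((PySem.List.sorted LB (fun x => x) false).countP (fun y => y < x) : Int)) = (fun x : Int => (LB.countP (fun y => y < x) : Int)) from funext (fun x => by rw [h1 x]; ring)]
    _ = (LA.map (fun x => (LB.countP (fun y => y < x) : Int))).sum :=
        (((PySem.List.sorted_perm LA (fun x => x) false).map _).sum_eq)

lemma tripleCount_eq_sums (dA dB : PySem.Dict Int Int) :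
    tripleCount dA dB
      = ((dA.keys.map (fun aa => (dB.keys.map (fun bb => if bb < aa then dA.getD aa 0 * dB.getD bb 0 else 0)).sum)).sum,
         (dA.keys.map (fun aa => (dB.keys.map (fun bb => if aa = bb then dA.getD aa 0 * dB.getD bb 0 else 0)).sum)).sum,
         (dA.keys.map (fun aa => (dB.keys.map (fun bb => if aa < bb then dA.getD aa 0 * dB.getD bb 0 else 0)).sum)).sum) := by
  have hinner : ∀ (aa : Int) (t : Int × Int × Int),
      dB.keys.foldl (fun t bb =>
        if aa > bb then (t.1 + dA.getD aa 0 * dB.getD bb 0, t.2.1, t.2.2)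
        else if aa = bb then (t.1, t.2.1 + dA.getD aa 0 * dB.getD bb 0, t.2.2)
        else (t.1, t.2.1, t.2.2 + dA.getD aa 0 * dB.getD bb 0)) t
      = (t.1 + (dB.keys.map (fun bb => if bb < aa then dA.getD aa 0 * dB.getD bb 0 else 0)).sum,
         t.2.1 + (dB.keys.map (fun bb => if aa = bb then dA.getD aa 0 * dB.getD bb 0 else 0)).sum,
         t.2.2 + (dB.keys.map (fun bb => if aa < bb then dA.getD aa 0 * dB.getD bb 0 else 0)).sum) := by
    intro aa t
    have hstep : (fun (t : Int × Int × Int) bb =>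
        if aa > bb then (t.1 + dA.getD aa 0 * dB.getD bb 0, t.2.1, t.2.2)
        else if aa = bb then (t.1, t.2.1 + dA.getD aa 0 * dB.getD bb 0, t.2.2)
        else (t.1, t.2.1, t.2.2 + dA.getD aa 0 * dB.getD bb 0))
      = (fun (t : Int × Int × Int) bb =>
        (t.1 + (if bb < aa then dA.getD aa 0 * dB.getD bb 0 else 0),
         t.2.1 + (if aa = bb then dA.getD aa 0 * dB.getD bb 0 else 0),
         t.2.2 + (if aa < bb then dA.getD aa 0 * dB.getD bb 0 else 0))) := by
      funext t bb
      rcases lt_trichotomy aa bb with h | h | h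
      · simp [h, not_lt.mpr (le_of_lt h), ne_of_lt h]
      · simp [h]
      · simp [h, not_lt.mpr (le_of_lt h), (ne_of_lt h).symm, lt_asymm h]
    rw [hstep]
    obtain ⟨t1, t2, t3⟩ := t
    rw [PySem.List.foldl_prod_mk (f := fun s bb => s + (if bb < aa then dA.getD aa 0 * dB.getD bb 0 else 0))
      (g := fun (s : Int × Int) bb =>
        (s.1 + (if aa = bb then dA.getD aa 0 * dB.getD bb 0 else 0),
         s.2 + (if aa < bb then dA.getD aa 0 * dB.getD bb 0 else 0)))]
    rw [PySem.List.foldl_prod_mk (f := fun s bb => s + (if aa = bb then dA.getD aa 0 * dB.getD bb 0 else 0))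
      (g := fun (s : Int) bb => s + (if aa < bb then dA.getD aa 0 * dB.getD bb 0 else 0))]
    rw [PySem.List.foldl_add, PySem.List.foldl_add, PySem.List.foldl_add]
  rw [tripleCount]
  have houter : (fun (t : Int × Int × Int) aa => dB.keys.foldl (fun t bb =>
        if aa > bb then (t.1 + dA.getD aa 0 * dB.getD bb 0, t.2.1, t.2.2)
        else if aa = bb then (t.1, t.2.1 + dA.getD aa 0 * dB.getD bb 0, t.2.2)
        else (t.1, t.2.1, t.2.2 + dA.getD aa 0 * dB.getD bb 0)) t)
      = fun (t : Int × Int × Int) aa =>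
      (t.1 + (dB.keys.map (fun bb => if bb < aa then dA.getD aa 0 * dB.getD bb 0 else 0)).sum,
       t.2.1 + (dB.keys.map (fun bb => if aa = bb then dA.getD aa 0 * dB.getD bb 0 else 0)).sum,
       t.2.2 + (dB.keys.map (fun bb => if aa < bb then dA.getD aa 0 * dB.getD bb 0 else 0)).sum) :=
    funext (fun t => funext (fun aa => hinner aa t))
  rw [houter]
  rw [PySem.List.foldl_prod_mk (f := fun s aa => s + (dB.keys.map (fun bb => if bb < aa then dA.getD aa 0 * dB.getD bb 0 else 0)).sum)
      (g := fun (s : Int × Int) aa =>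
        (s.1 + (dB.keys.map (fun bb => if aa = bb then dA.getD aa 0 * dB.getD bb 0 else 0)).sum,
         s.2 + (dB.keys.map (fun bb => if aa < bb then dA.getD aa 0 * dB.getD bb 0 else 0)).sum))]
  rw [PySem.List.foldl_prod_mk (f := fun s aa => s + (dB.keys.map (fun bb => if aa = bb then dA.getD aa 0 * dB.getD bb 0 else 0)).sum)
      (g := fun (s : Int) aa => s + (dB.keys.map (fun bb => if aa < bb then dA.getD aa 0 * dB.getD bb 0 else 0)).sum)]
  rw [PySem.List.foldl_add, PySem.List.foldl_add, PySem.List.foldl_add]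
  simp

lemma sum_ite_one (c : Int) (l : List Int) :
    (l.map (fun y => if y < c then (1:Int) else 0)).sum = (l.countP (fun y => y < c) : Int) := by
  rw [← PySem.List.sum_map_ite_one_zero (fun y => decide (y < c)) l]
  simp

lemma inner_sum_eq (dA dB : PySem.Dict Int Int) (LB : List Int) (aa : Int)
    (hBnd : dB.keys.Nodup) (hBmem : ∀ k, k ∈ dB.keys ↔ k ∈ LB)
    (hBcnt : ∀ k, dB.getD k 0 = ((LB.count k : Int))) (p : Int → Int → Prop) [∀ a b, Decidable (p a b)] :
    (dB.keys.map (fun bb => if p bb aa then dA.getD aa 0 * dB.getD bb 0 else 0)).sum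
      = dA.getD aa 0 * (LB.map (fun y => if p y aa then (1:Int) else 0)).sum := by
  have h1 : dB.keys.map (fun bb => if p bb aa then dA.getD aa 0 * dB.getD bb 0 else 0)
      = dB.keys.map (fun bb => (LB.count bb : Int) * (dA.getD aa 0 * (if p bb aa then (1:Int) else 0))) := by
    apply List.map_congr_left
    intro bb _
    rw [hBcnt bb]
    by_cases h : p bb aa <;> simp [h] <;> ring
  rw [h1, counter_sum _ _ _ hBnd hBmem, ← List.sum_map_mul_left]

lemma tripleCount_spec (dA dB : PySem.Dict Int Int) (LA LB : List Int)
    (hAnd : dA.keys.Nodup) (hAmem : ∀ k, k ∈ dA.keys ↔ k ∈ LA) (hAcnt : ∀ k, dA.getD k 0 = ((LA.count k : Int)))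
    (hBnd : dB.keys.Nodup) (hBmem : ∀ k, k ∈ dB.keys ↔ k ∈ LB) (hBcnt : ∀ k, dB.getD k 0 = ((LB.count k : Int))) :
    (tripleCount dA dB).1 = (LA.map (fun x => (LB.countP (fun y => y < x) : Int))).sum ∧
    (tripleCount dA dB).2.2 = (LB.map (fun y => (LA.countP (fun x => x < y) : Int))).sum := by
  rw [tripleCount_eq_sums]
  constructor
  · show (dA.keys.map (fun aa => (dB.keys.map (fun bb => if bb < aa then dA.getD aa 0 * dB.getD bb 0 else 0)).sum)).sum = _
    have h2 : dA.keys.map (fun aa => (dB.keys.map (fun bb => if bb < aa then dA.getD aa 0 * dB.getD bb 0 else 0)).sum)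
        = dA.keys.map (fun aa => (LA.count aa : Int) * (LB.countP (fun y => y < aa) : Int)) := by
      apply List.map_congr_left
      intro aa _
      rw [inner_sum_eq dA dB LB aa hBnd hBmem hBcnt (fun b a => b < a), sum_ite_one, hAcnt aa]
    rw [h2, counter_sum (fun x => (LB.countP (fun y => y < x) : Int)) _ _ hAnd hAmem]
  · show (dA.keys.map (fun aa => (dB.keys.map (fun bb => if aa < bb then dA.getD aa 0 * dB.getD bb 0 else 0)).sum)).sum = _
    have h2 : dA.keys.map (fun aa => (dB.keys.map (fun bb => if aa < bb then dA.getD aa 0 * dB.getD bb 0 else 0)).sum)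
        = dA.keys.map (fun aa => (LA.count aa : Int) * (LB.map (fun y => if aa < y then (1:Int) else 0)).sum) := by
      apply List.map_congr_left
      intro aa _
      rw [inner_sum_eq dA dB LB aa hBnd hBmem hBcnt (fun b a => a < b), hAcnt aa]
    rw [h2, counter_sum (fun x => (LB.map (fun y => if x < y then (1:Int) else 0)).sum) _ _ hAnd hAmem]
    rw [show LA.map (fun x => (LB.map (fun y => if x < y then (1:Int) else 0)).sum)
        = LA.map (fun x => (LB.map (fun y => (fun x y => if x < y then (1:Int) else 0) x y)).sum) from rfl]
    rw [sum_swap (fun x y => if x < y then (1:Int) else 0) LA LB]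
    apply congrArg
    apply List.map_congr_left
    intro y _
    exact sum_ite_one y LA

lemma sumsB_ne_nil (dice : List (List Int)) : ∀ (idxs : List Int),
    (∀ i ∈ idxs, PySem.List.pyGetD dice i [] ≠ []) → sumsB dice idxs ≠ [] := by
  have gen : ∀ (idxs : List Int) (init : List Int), init ≠ [] →
      (∀ i ∈ idxs, PySem.List.pyGetD dice i [] ≠ []) →
      idxs.foldl (fun sums i => sums.flatMap (fun s => (PySem.List.pyGetD dice i []).map (fun f => s + f))) init ≠ [] := by
    intro idxs
    induction idxs with
    | nil => intro init h _; simpa using h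
    | cons i idxs ih =>
      intro init hinit hd
      rw [List.foldl_cons]
      apply ih
      · simp only [ne_eq, List.flatMap_eq_nil_iff, not_forall]
        rcases List.exists_mem_of_ne_nil _ hinit with ⟨s0, hs0⟩
        refine ⟨s0, hs0, ?_⟩
        simp only [List.map_eq_nil_iff]
        exact hd i List.mem_cons_self
      · intro j hj; exact hd j (List.mem_cons_of_mem _ hj)
  intro idxs hd
  exact gen idxs [0] (by simp) hd

lemma wsum (die : List Int) (w : Int → Int) (s : Int) (ks : List Int) :
    (((ks.flatMap (fun k => die.map (fun f => (k + f, w k)))).filter (fun p => p.1 == s)).map (·.2)).sum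
      = (ks.map (fun k => w k * (die.countP (fun f => k + f == s) : Int))).sum := by
  induction ks with
  | nil => simp
  | cons k ks ih =>
    rw [List.flatMap_cons, List.filter_append, List.map_append, List.sum_append, ih]
    rw [List.map_cons, List.sum_cons]
    congr 1
    rw [List.filter_map, List.map_map]
    rw [show ((·.2) ∘ (fun f => (k + f, w k))) = (fun (_ : Int) => w k) from rfl]
    rw [PySem.List.sum_map_const_int, List.countP_eq_length_filter]
    rw [show ((fun (p : Int × Int) => p.1 == s) ∘ (fun f => (k + f, w k))) = (fun f => k + f == s) from rfl]
    ring

lemma buildCase_spec (dice : List (List Int)) : ∀ (idxs : List Int), idxs ≠ [] →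
    (∀ i ∈ idxs, PySem.List.pyGetD dice i [] ≠ []) →
    (buildCase dice idxs).keys.Nodup ∧
    (∀ k, k ∈ (buildCase dice idxs).keys ↔ k ∈ sumsB dice idxs) ∧
    (∀ k, (buildCase dice idxs).getD k 0 = ((sumsB dice idxs).count k : Int)) := by
  intro idxs
  induction idxs using List.reverseRecOn with
  | nil => intro h; exact absurd rfl h
  | append_singleton ys i ih =>
    intro _ hd
    have hdy : ∀ j ∈ ys, PySem.List.pyGetD dice j [] ≠ [] := fun j hj => hd j (by simp [hj])
    have hdi : PySem.List.pyGetD dice i [] ≠ [] := hd i (by simp)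
    rw [buildCase, List.foldl_append, sumsB, List.foldl_append, ← buildCase, ← sumsB]
    simp only [List.foldl_cons, List.foldl_nil]
    rcases eq_or_ne ys [] with hys | hys
    · -- first die: the counter branch
      subst hys
      simp only [buildCase, sumsB, List.foldl_nil, List.foldl_cons]
      have hemp : (PySem.Dict.empty : PySem.Dict Int Int).items.isEmpty = true := rfl
      rw [hemp, if_pos rfl, PySem.Dict.foldl_insert_getD_add_one_eq_counter]
      have hmapid : (PySem.List.pyGetD dice i []).map (fun f => (0:Int) + f) = PySem.List.pyGetD dice i [] := by
        simp
      refine ⟨?_, ?_, ?_⟩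
      · rw [PySem.Dict.keys_counter]; exact PySem.Set.nodup_ofList _
      · intro k
        rw [PySem.Dict.keys_counter, PySem.Set.mem_ofList]
        simp [hmapid]
      · intro k
        rw [PySem.Dict.getD_counter]
        simp [hmapid]
    · -- later die: the cross-product branch
      have hinv := ih hys hdy
      obtain ⟨hnd, hmem, hcnt⟩ := hinv
      have hLne : sumsB dice ys ≠ [] := sumsB_ne_nil dice ys hdy
      have hit : (buildCase dice ys).items.isEmpty = false := by
        cases h : (buildCase dice ys).items.isEmpty
        · rfl
        · exfalso
          have hitems : (buildCase dice ys).items = [] := List.isEmpty_iff.mp h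
          rcases List.exists_mem_of_ne_nil _ hLne with ⟨s0, hs0⟩
          have hk : s0 ∈ (buildCase dice ys).keys := (hmem s0).2 hs0
          simp only [PySem.Dict.keys, hitems, List.map_nil] at hk
          exact (List.not_mem_nil) hk
      rw [hit]
      simp only [Bool.false_eq_true, if_false]
      rw [nested_eq_wfold (PySem.List.pyGetD dice i []) (fun k => (buildCase dice ys).getD k 0)
        (buildCase dice ys).keys PySem.Dict.empty]
      have hkeys : PySem.Dict.keys (List.foldl (fun c p => c.insert p.1 (c.getD p.1 0 + p.2)) PySem.Dict.empty
            ((buildCase dice ys).keys.flatMap (fun k =>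
            (PySem.List.pyGetD dice i []).map (fun f => (k + f, (buildCase dice ys).getD k 0)))))
          = PySem.Set.ofList (((buildCase dice ys).keys.flatMap (fun k =>
            (PySem.List.pyGetD dice i []).map (fun f => (k + f, (buildCase dice ys).getD k 0)))).map (·.1)) := by
        rw [PySem.Dict.keys_foldl_insert_key _ (fun p : Int × Int => p.1) (fun (c : PySem.Dict Int Int) (p : Int × Int) => c.getD p.1 0 + p.2)]
        rw [show (PySem.Dict.empty : PySem.Dict Int Int).keys = [] from rfl]
        rw [PySem.Set.update_nil_left]
      refine ⟨?_, ?_, ?_⟩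
      · exact PySem.Dict.nodup_keys_foldl_insert_key _ (fun p : Int × Int => p.1)
          (fun (c : PySem.Dict Int Int) (p : Int × Int) => c.getD p.1 0 + p.2) _ PySem.Dict.nodup_keys_empty
      · intro k
        rw [hkeys, PySem.Set.mem_ofList]
        simp only [List.mem_map, List.mem_flatMap]
        constructor
        · rintro ⟨p, ⟨kk, hkk, ⟨f, hf, rfl⟩⟩, rfl⟩
          exact ⟨kk, (hmem kk).1 hkk, ⟨f, hf, rfl⟩⟩
        · rintro ⟨x, hx, ⟨f, hf, rfl⟩⟩
          exact ⟨(x + f, (buildCase dice ys).getD x 0), ⟨x, (hmem x).2 hx, ⟨f, hf, rfl⟩⟩, rfl⟩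
      · intro k
        rw [getD_wfold, wsum]
        rw [show (PySem.Dict.empty : PySem.Dict Int Int).getD k 0 = 0 from rfl, zero_add]
        have hw : (buildCase dice ys).keys.map (fun x => (buildCase dice ys).getD x 0 * ((PySem.List.pyGetD dice i []).countP (fun f => x + f == k) : Int))
            = (buildCase dice ys).keys.map (fun x => ((sumsB dice ys).count x : Int) * ((PySem.List.pyGetD dice i []).countP (fun f => x + f == k) : Int)) := by
          apply List.map_congr_left
          intro x _
          rw [hcnt x]
        rw [hw, counter_sum (fun x => ((PySem.List.pyGetD dice i []).countP (fun f => x + f == k) : Int)) _ _ hnd hmem]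
        rw [count_flatMap]
        apply congrArg
        apply List.map_congr_left
        intro x _
        rw [List.count, List.countP_map]
        rfl

lemma matchup_eq (dice : List (List Int)) (a b : List Int) (ha : a ≠ []) (hb : b ≠ [])
    (hda : ∀ i ∈ a, PySem.List.pyGetD dice i [] ≠ []) (hdb : ∀ i ∈ b, PySem.List.pyGetD dice i [] ≠ []) :
    (tripleCount (buildCase dice a) (buildCase dice b)).1
        = countGreater (PySem.List.sorted (sumsB dice a) (fun x => x) false)
                       (PySem.List.sorted (sumsB dice b) (fun x => x) false) ∧
    (tripleCount (buildCase dice a) (buildCase dice b)).2.2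
        = countGreater (PySem.List.sorted (sumsB dice b) (fun x => x) false)
                       (PySem.List.sorted (sumsB dice a) (fun x => x) false) := by
  obtain ⟨hAnd, hAmem, hAcnt⟩ := buildCase_spec dice a ha hda
  obtain ⟨hBnd, hBmem, hBcnt⟩ := buildCase_spec dice b hb hdb
  obtain ⟨h1, h2⟩ := tripleCount_spec (buildCase dice a) (buildCase dice b) (sumsB dice a) (sumsB dice b)
    hAnd hAmem hAcnt hBnd hBmem hBcnt
  exact ⟨by rw [h1, countGreater_spec], by rw [h2, countGreater_spec]⟩

-- empties-form-a-suffix (Pre_) gives: an empty die is never followed by a nonempty one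
lemma pre_mono (dice : List (List Int)) (hpre : ∀ d ∈ dice.dropWhile (fun d => !d.isEmpty), d = []) :
    ∀ x y : Int, 0 ≤ x → x < y → y < (dice.length : Int) →
      PySem.List.pyGetD dice x [] = [] → PySem.List.pyGetD dice y [] = [] := by
  intro x y hx hxy hyn hxe
  have hxN : x.toNat < dice.length := by omega
  have hyN : y.toNat < dice.length := by omega
  rw [PySem.List.pyGetD_of_nonneg _ _ hx] at hxe
  rw [PySem.List.pyGetD_of_nonneg _ _ (by omega : (0:Int) ≤ y)]
  have hsplit := List.takeWhile_append_dropWhile (p := fun d : List Int => !d.isEmpty) (l := dice)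
  have hxge : (dice.takeWhile (fun d => !d.isEmpty)).length ≤ x.toNat := by
    by_contra hlt
    push_neg at hlt
    rw [← hsplit, List.getD_append _ _ _ _ hlt] at hxe
    have hmem : (dice.takeWhile (fun d => !d.isEmpty)).getD x.toNat [] ∈ dice.takeWhile (fun d => !d.isEmpty) := by
      rw [List.getD_eq_getElem _ _ hlt]
      exact List.getElem_mem _
    have himp := List.mem_takeWhile_imp hmem
    rw [hxe] at himp
    simp at himp
  have hyge : (dice.takeWhile (fun d => !d.isEmpty)).length ≤ y.toNat := by omega
  have hlen := congrArg List.length hsplit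
  rw [List.length_append] at hlen
  have hlt2 : y.toNat - (dice.takeWhile (fun d => !d.isEmpty)).length < (dice.dropWhile (fun d => !d.isEmpty)).length := by
    omega
  conv_lhs => rw [← hsplit]
  rw [List.getD_append_right _ _ _ _ hyge, List.getD_eq_getElem _ _ hlt2]
  exact hpre _ (List.getElem_mem _)

lemma foldl_sums_nil (dice : List (List Int)) : ∀ idxs : List Int,
    idxs.foldl (fun sums i => sums.flatMap (fun s => (PySem.List.pyGetD dice i []).map (fun f => s + f))) [] = [] := by
  intro idxs
  induction idxs with
  | nil => rfl
  | cons i rest ih => simpa using ih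

lemma sumsB_nil_of_empty (dice : List (List Int)) : ∀ (idxs init : List Int),
    (∃ i ∈ idxs, PySem.List.pyGetD dice i [] = []) →
    idxs.foldl (fun sums i => sums.flatMap (fun s => (PySem.List.pyGetD dice i []).map (fun f => s + f))) init = [] := by
  intro idxs
  induction idxs with
  | nil => rintro init ⟨i, hi, _⟩; simp at hi
  | cons i rest ih =>
    rintro init ⟨x, hx, hxe⟩
    rcases List.mem_cons.mp hx with rfl | hx'
    · rw [List.foldl_cons]
      have hstep : init.flatMap (fun s => (PySem.List.pyGetD dice x []).map (fun f => s + f)) = [] := by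
        rw [hxe]; simp
      rw [hstep, foldl_sums_nil]
    · rw [List.foldl_cons]
      exact ih _ ⟨x, hx', hxe⟩

-- an empty die thrown last leaves A's dict empty (both branches of the guard)
lemma buildCase_last_empty (dice : List (List Int)) (h' : List Int) (i : Int)
    (hie : PySem.List.pyGetD dice i [] = []) : buildCase dice (h' ++ [i]) = PySem.Dict.empty := by
  rw [buildCase, List.foldl_append, List.foldl_cons, List.foldl_nil, hie]
  simp only [List.foldl_nil]
  split
  · next hemp =>
      apply PySem.Dict.ext
      rw [List.isEmpty_iff.mp hemp]
      rfl
  · exact PySem.List.foldl_ignore _ _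

lemma tripleCount_empty_left (d : PySem.Dict Int Int) :
    tripleCount PySem.Dict.empty d = (0, 0, 0) := rfl

lemma tripleCount_empty_right (d : PySem.Dict Int Int) :
    tripleCount d PySem.Dict.empty = (0, 0, 0) := by
  rw [tripleCount]
  rw [show (PySem.Dict.empty : PySem.Dict Int Int).keys = [] from rfl]
  simp only [List.foldl_nil]
  exact PySem.List.foldl_ignore _ _

lemma cg_sorted_nil_right (L : List Int) :
    countGreater (PySem.List.sorted L (fun x => x) false) [] = 0 := by
  rw [countGreater, cgAux_spec _ _ _ _ (PySem.List.sorted_pairwise L (fun x => x)) (by simp)]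
  simp

-- in a strictly increasing half that contains an empty die, the last die is empty
lemma last_empty (dice : List (List Int)) (h : List Int)
    (hsub : h.Sublist (PySem.List.pyRange 0 (dice.length : Int) 1))
    (hmono : ∀ x y : Int, 0 ≤ x → x < y → y < (dice.length : Int) →
      PySem.List.pyGetD dice x [] = [] → PySem.List.pyGetD dice y [] = [])
    (hxe : ∃ x ∈ h, PySem.List.pyGetD dice x [] = []) :
    ∃ h' i, h = h' ++ [i] ∧ PySem.List.pyGetD dice i [] = [] := by
  obtain ⟨x, hx, hxe⟩ := hxe
  rcases List.eq_nil_or_concat' h with rfl | ⟨h', a, rfl⟩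
  · simp at hx
  refine ⟨h', a, rfl, ?_⟩
  rcases List.mem_append.mp hx with hx' | hx'
  · have hpw : (h' ++ [a]).Pairwise (· < ·) :=
      List.Pairwise.sublist hsub (PySem.List.pairwise_lt_pyRange_one _ _)
    rw [List.pairwise_append] at hpw
    have hlt : x < a := hpw.2.2 x hx' a (by simp)
    have hax : a ∈ PySem.List.pyRange 0 (dice.length : Int) 1 := hsub.subset (by simp)
    have hxx : x ∈ PySem.List.pyRange 0 (dice.length : Int) 1 :=
      hsub.subset (List.mem_append_left _ hx')
    obtain ⟨hx0, _⟩ := PySem.List.mem_pyRange_one.mp hxx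
    obtain ⟨_, han⟩ := PySem.List.mem_pyRange_one.mp hax
    exact hmono x a hx0 hlt han hxe
  · have hxa : x = a := by simpa using hx'
    exact hxa ▸ hxe

-- per-matchup equality, now also covering halves that contain an empty die (both count zero)
lemma matchup_eq' (dice : List (List Int)) (a b : List Int)
    (hmono : ∀ x y : Int, 0 ≤ x → x < y → y < (dice.length : Int) →
      PySem.List.pyGetD dice x [] = [] → PySem.List.pyGetD dice y [] = [])
    (ha : a ≠ []) (hb : b ≠ [])
    (hsuba : a.Sublist (PySem.List.pyRange 0 (dice.length : Int) 1))
    (hsubb : b.Sublist (PySem.List.pyRange 0 (dice.length : Int) 1)) :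
    (tripleCount (buildCase dice a) (buildCase dice b)).1
        = countGreater (PySem.List.sorted (sumsB dice a) (fun x => x) false)
                       (PySem.List.sorted (sumsB dice b) (fun x => x) false) ∧
    (tripleCount (buildCase dice a) (buildCase dice b)).2.2
        = countGreater (PySem.List.sorted (sumsB dice b) (fun x => x) false)
                       (PySem.List.sorted (sumsB dice a) (fun x => x) false) := by
  by_cases hea : ∀ x ∈ a, PySem.List.pyGetD dice x [] ≠ []
  · by_cases heb : ∀ x ∈ b, PySem.List.pyGetD dice x [] ≠ []
    · exact matchup_eq dice a b ha hb hea heb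
    · push_neg at heb
      obtain ⟨h', lastb, heq, hle⟩ := last_empty dice b hsubb hmono heb
      have hbempty : buildCase dice b = PySem.Dict.empty := by
        rw [heq]; exact buildCase_last_empty dice h' lastb hle
      have hsb : sumsB dice b = [] := by
        rw [sumsB]; exact sumsB_nil_of_empty dice b [0] heb
      rw [hbempty, tripleCount_empty_right, hsb]
      rw [show PySem.List.sorted ([] : List Int) (fun x => x) false = [] from rfl]
      exact ⟨by rw [cg_sorted_nil_right], rfl⟩
  · push_neg at hea
    obtain ⟨h', lasta, heq, hle⟩ := last_empty dice a hsuba hmono hea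
    have haempty : buildCase dice a = PySem.Dict.empty := by
      rw [heq]; exact buildCase_last_empty dice h' lasta hle
    have hsa : sumsB dice a = [] := by
      rw [sumsB]; exact sumsB_nil_of_empty dice a [0] hea
    rw [haempty, tripleCount_empty_left, hsa]
    rw [show PySem.List.sorted ([] : List Int) (fun x => x) false = [] from rfl]
    exact ⟨rfl, by rw [cg_sorted_nil_right]⟩


theorem main_eq (dice : List (List Int)) (hpre : ∀ d ∈ dice.dropWhile (fun d => !d.isEmpty), d = []) :
    solution dice = solution_alt dice := by
  unfold solution solution_alt
  simp only [List.foldl_map]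
  apply congrArg
  apply PySem.List.foldl_congr_mem
  intro st i hi
  have hilt : i < (PySem.List.combinations (PySem.List.pyRange 0 (dice.length : Int) 1) (dice.length / 2)).length / 2 :=
    List.mem_range.mp hi
  set com := PySem.List.combinations (PySem.List.pyRange 0 (dice.length : Int) 1) (dice.length / 2) with hcomdef
  have hcom2 : 2 ≤ com.length := by omega
  have hr : dice.length / 2 ≠ 0 := by
    intro h0
    rw [h0, PySem.List.combinations_zero] at hcomdef
    simp [hcomdef] at hcom2
  have hmono := pre_mono dice hpre
  have hgood : ∀ j : Nat, j < com.length → com.getD j [] ≠ [] ∧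
      (com.getD j []).Sublist (PySem.List.pyRange 0 (dice.length : Int) 1) := by
    intro j hj
    have hget : com.getD j [] = com[j] := List.getD_eq_getElem com [] hj
    have hmem : com.getD j [] ∈ com := by rw [hget]; exact List.getElem_mem hj
    have hc := (PySem.List.mem_combinations_iff _ _ _).mp (by rw [hcomdef] at hmem; exact hmem)
    refine ⟨?_, hc.1⟩
    intro hnil
    rw [hnil] at hc
    exact hr (by simpa using hc.2.symm)
  have ha := hgood i (by omega)
  have hb := hgood (com.length - 1 - i) (by omega)
  obtain ⟨hwin, hlose⟩ := matchup_eq' dice (com.getD i []) (com.getD (com.length - 1 - i) [])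
    hmono ha.1 hb.1 ha.2 hb.2
  simp only [hwin, hlose]

-- ===== VERDICT (by name: the statement is the Claim_ definition above) =====
theorem solution_spec : Claim_equal_solution := by
  intro dice _ hpre
  unfold Spec_solution
  unfold Pre_solution at hpre
  exact main_eq dice hpre
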